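-- pv_equiv track=rewrite | github.com/haiakbar/learn-python | FCC - Scientific Computing Using Python/2TimeCalculator/time_calculator.py | combine_time
-- ===== SOURCE A (Python) =====
-- def combine_time(start, interval):
--
--     sum_hour = start[0] + interval[0]
--     sum_minutes = start[1] + interval[1]
--
--     sum_hour += sum_minutes//60
--     sum_minutes = sum_minutes%60
--
--     half_day_passed = 0
--
--     while sum_hour > 12:
--         sum_hour -= 12
--         half_day_passed += 1
--
--     if sum_hour == 12:
--         half_day_passed += 1
--
--     return (sum_hour, sum_minutes, start[2], half_day_passed)
-- ===== SOURCE B (Python) =====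
-- def combine_time(start, interval):
--     m = start[1] + interval[1]
--     h = start[0] + interval[0] + m // 60
--     if h >= 13:
--         hour = (h - 13) % 12 + 1
--         half = (h - 13) // 12 + 1
--     else:
--         hour = h
--         half = 0
--     return (hour, m % 60, start[2], half + (1 if hour == 12 else 0))
-- ===== Notes on version B (the rewrite author's own statement) =====
-- stated objective: alternative
-- what changed: Replaced the subtract-12-until-at-most-12 loop with a closed-form divmod on (h-13), computing the final hour and the half-day count by direct arithmetic.
-- outside the precondition, e.g. on combine_time((1,), (2, 3)): A raises IndexError, B raises IndexError
import Mathlib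
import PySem

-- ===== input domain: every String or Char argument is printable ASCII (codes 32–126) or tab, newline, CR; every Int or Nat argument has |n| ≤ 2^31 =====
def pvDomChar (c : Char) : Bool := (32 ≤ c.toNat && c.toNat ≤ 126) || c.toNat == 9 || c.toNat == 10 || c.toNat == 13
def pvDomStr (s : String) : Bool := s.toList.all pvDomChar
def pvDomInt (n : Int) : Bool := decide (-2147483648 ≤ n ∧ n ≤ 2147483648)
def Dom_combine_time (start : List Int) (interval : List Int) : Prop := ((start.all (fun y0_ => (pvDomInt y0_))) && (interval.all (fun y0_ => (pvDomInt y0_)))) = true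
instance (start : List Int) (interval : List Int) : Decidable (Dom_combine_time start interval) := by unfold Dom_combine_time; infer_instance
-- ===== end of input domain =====

-- B replaces A's subtract-12-until-≤12 loop by a closed-form divmod on (h-13) (alternative arithmetic formulation).

-- ===== PORT A =====
-- the 'while sum_hour > 12' loop of A, carrying (sum_hour, half_day_passed)
def combineLoopA (h : Int) (c : Int) : Int × Int :=
  if 12 < h then combineLoopA (h - 12) (c + 1) else (h, c)
termination_by (h - 12).toNat
decreasing_by omega

def combine_time (start : List Int) (interval : List Int) : List Int :=
  match PySem.List.pyGet? start 0, PySem.List.pyGet? interval 0,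
        PySem.List.pyGet? start 1, PySem.List.pyGet? interval 1,
        PySem.List.pyGet? start 2 with
  | some s0, some i0, some s1, some i1, some s2 =>
    let sum_hour := s0 + i0
    let sum_minutes := s1 + i1
    let sum_hour := sum_hour + PySem.Int.floordiv sum_minutes 60
    let sum_minutes := PySem.Int.mod sum_minutes 60
    let hc := combineLoopA sum_hour 0
    let half := if hc.1 = 12 then hc.2 + 1 else hc.2
    [hc.1, sum_minutes, s2, half]
  | _, _, _, _, _ => []  -- an out-of-range index raises IndexError in Python; excluded by Pre_

-- ===== PORT B =====
def combine_time_alt (start : List Int) (interval : List Int) : List Int :=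
  -- start[0..2] / interval[0..1] read by structural matching (exact for these
  -- nonnegative literal indices); the fallback is the IndexError case, excluded by Pre_
  match start, interval with
  | s0 :: s1 :: s2 :: _, i0 :: i1 :: _ =>
    let m := s1 + i1
    let h := s0 + i0 + PySem.Int.floordiv m 60
    let hour := if 13 ≤ h then PySem.Int.mod (h - 13) 12 + 1 else h
    let half := if 13 ≤ h then PySem.Int.floordiv (h - 13) 12 + 1 else 0
    [hour, PySem.Int.mod m 60, s2, half + (if hour = 12 then 1 else 0)]
  | _, _ => []

-- ===== PRECONDITION & SPEC =====
-- Pre_ excludes exactly the inputs on which Python A raises IndexError (too-short lists).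
def Pre_combine_time (start : List Int) (interval : List Int) : Prop :=
  3 ≤ start.length ∧ 2 ≤ interval.length
instance (start : List Int) (interval : List Int) : Decidable (Pre_combine_time start interval) := by
  unfold Pre_combine_time; infer_instance

def pvWitness_combine_time : List Int × List Int := ([11, 55, 7], [3, 20])

def Spec_combine_time (start : List Int) (interval : List Int) (out : List Int) : Prop := out = combine_time_alt start interval
instance (start : List Int) (interval : List Int) (out : List Int) : Decidable (Spec_combine_time start interval out) := by unfold Spec_combine_time; infer_instance

-- ===== CLAIM (what is proved, stated in full; the proofs are below) =====
def Claim_equal_combine_time : Prop := ∀ (start : List Int) (interval : List Int), Dom_combine_time start interval → Pre_combine_time start interval → Spec_combine_time start interval (combine_time start interval)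

-- ===== LEMMAS AND PROOFS =====

theorem pyGet?_one_cons (x y : Int) (t : List Int) :
    PySem.List.pyGet? (x :: y :: t) 1 = some y := by
  simpa using PySem.List.pyGet?_ofNat (x :: y :: t) 1 (by simp)

theorem pyGet?_two_cons (x y z : Int) (t : List Int) :
    PySem.List.pyGet? (x :: y :: z :: t) 2 = some z := by
  simpa using PySem.List.pyGet?_ofNat (x :: y :: z :: t) 2 (by simp)

-- closed form of A's while loop (Int.emod/ediv versions; divisors are positive)
theorem combineLoopA_eq (h c : Int) :
    combineLoopA h c =
      (if 13 ≤ h then (h - 13) % 12 + 1 else h,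
       if 13 ≤ h then c + ((h - 13) / 12 + 1) else c) := by
  induction h, c using combineLoopA.induct with
  | case1 h c hlt ih =>
    rw [combineLoopA, if_pos hlt, ih]
    by_cases h25 : 13 ≤ h - 12 <;>
      simp only [h25, if_true, if_false, if_pos (by omega : (13:Int) ≤ h), Prod.mk.injEq] <;>
      constructor <;> omega
  | case2 h c hlt =>
    rw [combineLoopA, if_neg hlt]
    simp only [if_neg (by omega : ¬ (13:Int) ≤ h)]

-- ===== VERDICT (by name: the statement is the Claim_ definition above) =====
theorem combine_time_spec : Claim_equal_combine_time := by
  intro start interval _hdom hpre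
  obtain ⟨hs, hi⟩ := hpre
  rcases start with _ | ⟨s0, start⟩; · simp at hs
  rcases start with _ | ⟨s1, start⟩; · simp at hs
  rcases start with _ | ⟨s2, start⟩; · simp at hs
  rcases interval with _ | ⟨i0, interval⟩; · simp at hi
  rcases interval with _ | ⟨i1, interval⟩; · simp at hi
  unfold Spec_combine_time combine_time combine_time_alt
  simp only [PySem.List.pyGet?_zero_cons, pyGet?_one_cons, pyGet?_two_cons]
  simp only [combineLoopA_eq,
    PySem.Int.mod_eq_emod_of_pos (show (0:Int) < 12 by norm_num),
    PySem.Int.floordiv_eq_ediv_of_pos (show (0:Int) < 12 by norm_num)]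
  split_ifs <;> simp_all
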